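-- pv_equiv track=rewrite | github.com/vakyritsis/Neurofuzzy-Computing | Problem set 03/problem3.py | competitive_layer
-- ===== SOURCE A (Python) =====
-- def competitive_layer(input_list):
--     """
--     Competitive layer that returns the index of the biggest number,
--     with the smallest index breaking ties.
--     """
--     max_index = 0
--     max_value = input_list[0]
--
--     for i in range(1, len(input_list)):
--         if input_list[i] > max_value:
--             max_index = i
--             max_value = input_list[i]
--         elif input_list[i] == max_value:
--             max_index = min(max_index, i)
--
--     result = [0] * len(input_list)
--     result[max_index] = 1
--
--     return result
-- ===== SOURCE B (Python) =====
-- def competitive_layer(input_list):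
--     """
--     Competitive layer that returns the index of the biggest number,
--     with the smallest index breaking ties.
--     """
--     order = sorted(range(len(input_list)), key=lambda i: -input_list[i])
--     winner = order[0]
--     return [1 if i == winner else 0 for i in range(len(input_list))]
-- ===== Notes on version B (the rewrite author's own statement) =====
-- stated objective: alternative
-- what changed: Replaces A's single index-tracking scan by sorting the index list by descending value (stable sort puts the first maximum's index in front) and building the one-hot with a comprehension instead of allocate-then-assign.
-- outside the precondition, e.g. on competitive_layer([]): A raises IndexError, B raises IndexError
import Mathlib
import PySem

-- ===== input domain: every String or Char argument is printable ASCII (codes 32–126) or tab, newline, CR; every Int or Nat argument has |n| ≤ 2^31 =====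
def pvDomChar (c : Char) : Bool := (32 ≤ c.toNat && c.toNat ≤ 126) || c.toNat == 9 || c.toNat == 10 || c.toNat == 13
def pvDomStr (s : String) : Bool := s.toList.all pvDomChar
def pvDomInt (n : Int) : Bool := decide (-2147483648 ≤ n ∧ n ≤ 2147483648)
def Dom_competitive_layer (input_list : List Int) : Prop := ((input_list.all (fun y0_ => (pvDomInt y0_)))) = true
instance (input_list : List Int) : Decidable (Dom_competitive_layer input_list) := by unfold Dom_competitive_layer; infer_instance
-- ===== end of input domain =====

-- B replaces A's index-tracking scan by a stable sort of the index list by descending value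
-- (the first maximum's index ends up in front) and builds the one-hot by a comprehension.

-- ===== PORT A =====
-- the loop body of A: i ranges over range(1, len), always in range, so pyGetD is exact here
def pvStepA (l : List Int) (st : Int × Int) (i : Int) : Int × Int :=
  let x := PySem.List.pyGetD l i 0
  if x > st.2 then (i, x)
  else if x = st.2 then (min st.1 i, st.2)
  else st

def competitive_layer (input_list : List Int) : List Int :=
  match PySem.List.pyGet? input_list 0 with
  | none => []   -- reading the first element raises IndexError on the empty list; excluded by Pre_
  | some v0 =>
    let st := (PySem.List.pyRange 1 (input_list.length : Int) 1).foldl (pvStepA input_list) (0, v0)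
    PySem.List.pySetD (List.replicate input_list.length 0) st.1 1

-- ===== PORT B =====
def competitive_layer_alt (input_list : List Int) : List Int :=
  let order := PySem.List.sorted (PySem.List.pyRange 0 (input_list.length : Int) 1)
                 (fun i => -(PySem.List.pyGetD input_list i 0)) false
  match order with
  | [] => []   -- indexing the head of the sorted order raises IndexError on the empty list; excluded by Pre_
  | winner :: _ =>
    (PySem.List.pyRange 0 (input_list.length : Int) 1).map (fun i => if i = winner then 1 else 0)

-- ===== PRECONDITION & SPEC =====
-- A raises IndexError on the empty list (it reads the first element); B raises IndexError there too. Only the empty list is excluded.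
def Pre_competitive_layer (input_list : List Int) : Prop := input_list ≠ []
instance (input_list : List Int) : Decidable (Pre_competitive_layer input_list) := by unfold Pre_competitive_layer; infer_instance
def pvWitness_competitive_layer : List Int := [3, 7, 7, 1]

def Spec_competitive_layer (input_list : List Int) (out : List Int) : Prop := out = competitive_layer_alt input_list
instance (input_list : List Int) (out : List Int) : Decidable (Spec_competitive_layer input_list out) := by unfold Spec_competitive_layer; infer_instance

-- ===== CLAIM (what is proved, stated in full; the proofs are below) =====
def Claim_equal_competitive_layer : Prop := ∀ (input_list : List Int), Dom_competitive_layer input_list → Pre_competitive_layer input_list → Spec_competitive_layer input_list (competitive_layer input_list)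

-- ===== LEMMAS AND PROOFS =====

-- the shared "first index of the maximum" fold both programs reduce to
def pvStep (l : List Int) (b i : Int) : Int :=
  if PySem.List.pyGetD l b 0 < PySem.List.pyGetD l i 0 then i else b

-- head of an insertion step: the new head is the key-smaller of the incoming element and the old head
lemma pvInsertBy_cons (lt : Int → Int → Bool) (y h : Int) (t : List Int) :
    ∃ t', PySem.List.insertBy lt y (h :: t) = (if lt y h then y else h) :: t' := by
  by_cases hb : lt y h
  · exact ⟨h :: t, by simp [PySem.List.insertBy, hb]⟩
  · exact ⟨PySem.List.insertBy lt y t, by simp [PySem.List.insertBy, hb]⟩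

-- head of the insertion-sort fold = the running arg-min fold of the heads
lemma pvHead_foldl_insertBy (lt : Int → Int → Bool) :
    ∀ (xs : List Int) (h : Int) (t : List Int),
      ((xs.foldl (fun acc x => PySem.List.insertBy lt x acc) (h :: t)).head?)
        = some (xs.foldl (fun c y => if lt y c then y else c) h) := by
  intro xs
  induction xs with
  | nil => intro h t; rfl
  | cons x xs ih =>
    intro h t
    obtain ⟨t', ht'⟩ := pvInsertBy_cons lt x h t
    simp only [List.foldl_cons, ht', ih]

-- A's pair-fold carries (index, value-at-index) and its index component is pvStep's fold
lemma pvFoldA_eq (l : List Int) :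
    ∀ (k : Nat) (b : Int), 0 ≤ b → b < (k : Int) →
      ((PySem.List.pyRange (k : Int) (l.length : Int) 1).foldl (pvStepA l) (b, PySem.List.pyGetD l b 0)).1
        = (PySem.List.pyRange (k : Int) (l.length : Int) 1).foldl (pvStep l) b := by
  intro k b hb0 hbk
  rcases Nat.lt_or_ge k l.length with hlt | hge
  · have hk : (k : Int) < (l.length : Int) := by exact_mod_cast hlt
    rw [PySem.List.pyRange_one_cons hk]
    simp only [List.foldl_cons]
    set x := PySem.List.pyGetD l (k : Int) 0 with hx
    have hstep : pvStepA l (b, PySem.List.pyGetD l b 0) (k : Int)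
        = (pvStep l b (k : Int), PySem.List.pyGetD l (pvStep l b (k : Int)) 0) := by
      unfold pvStepA pvStep
      by_cases h1 : PySem.List.pyGetD l b 0 < x
      · simp [← hx, h1]
      · by_cases h2 : x = PySem.List.pyGetD l b 0
        · simp [← hx, h2, min_eq_left (le_of_lt hbk)]
        · have : ¬ x > PySem.List.pyGetD l b 0 := h1
          simp [← hx, this, h2]
    rw [hstep]
    have hb' : 0 ≤ pvStep l b (k : Int) ∧ pvStep l b (k : Int) < ((k + 1 : Nat) : Int) := by
      unfold pvStep
      split_ifs
      · exact ⟨Int.natCast_nonneg k, by push_cast; omega⟩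
      · exact ⟨hb0, by push_cast; omega⟩
    have := pvFoldA_eq l (k + 1) (pvStep l b (k : Int)) hb'.1 hb'.2
    push_cast at this ⊢
    exact this
  · have hk : (l.length : Int) ≤ (k : Int) := by exact_mod_cast hge
    rw [PySem.List.pyRange_one_eq_nil hk]
    rfl
termination_by k => l.length - k
decreasing_by omega

-- the pvStep fold stays within the bounds of its inputs
lemma pvFold_bounds (l : List Int) (xs : List Int) (n : Int) :
    ∀ b, (∀ x ∈ xs, 0 ≤ x ∧ x < n) → 0 ≤ b → b < n →
      0 ≤ xs.foldl (pvStep l) b ∧ xs.foldl (pvStep l) b < n := by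
  induction xs with
  | nil => intro b _ hb0 hbn; exact ⟨hb0, hbn⟩
  | cons x xs ih =>
    intro b hx hb0 hbn
    simp only [List.foldl_cons]
    have hxm := hx x (List.mem_cons_self)
    have hrest : ∀ y ∈ xs, 0 ≤ y ∧ y < n := fun y hy => hx y (List.mem_cons_of_mem x hy)
    unfold pvStep
    split_ifs
    · exact ih x hrest hxm.1 hxm.2
    · exact ih b hrest hb0 hbn

-- B's comparison (on negated keys) is pvStep's comparison
lemma pvStep_eq_lt (l : List Int) (c y : Int) :
    (if decide (-(PySem.List.pyGetD l y 0) < -(PySem.List.pyGetD l c 0)) then y else c)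
      = pvStep l c y := by
  unfold pvStep
  by_cases h : PySem.List.pyGetD l c 0 < PySem.List.pyGetD l y 0
  · simp [h]
  · simp [fun hc => h (by omega : PySem.List.pyGetD l c 0 < PySem.List.pyGetD l y 0)]

-- the two output shapes agree for an in-range winner index
lemma pvOut_eq (n : Nat) (j : Int) (hj0 : 0 ≤ j) (_hjn : j < (n : Int)) :
    PySem.List.pySetD (List.replicate n (0 : Int)) j 1
      = (PySem.List.pyRange 0 (n : Int) 1).map (fun i => if i = j then 1 else 0) := by
  rw [PySem.List.pySetD_of_nonneg _ _ hj0, PySem.List.pyRange_one]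
  apply List.ext_getElem
  · simp
  · intro i h1 h2
    simp only [List.getElem_set, List.getElem_replicate, List.getElem_map, List.getElem_range]
    have hi : i < n := by simpa using h1
    split_ifs <;> omega

theorem competitive_layer_spec : Claim_equal_competitive_layer := by
  intro l _ hpre
  obtain ⟨v0, t, rfl⟩ : ∃ v0 t, l = v0 :: t := by
    cases l with
    | nil => exact absurd rfl hpre
    | cons a t => exact ⟨a, t, rfl⟩
  set l := v0 :: t with hl
  have h0 : PySem.List.pyGet? l 0 = some v0 := by simp [l]
  have hv0 : PySem.List.pyGetD l 0 0 = v0 := by simp [l]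
  have hlen : 0 < (l.length : Int) := by simp [l]
  -- the common arg-max index
  set j := (PySem.List.pyRange 1 (l.length : Int) 1).foldl (pvStep l) 0 with hj
  -- A's side: the pair fold's index component is j
  have hA1 : ((PySem.List.pyRange 1 (l.length : Int) 1).foldl (pvStepA l) (0, v0)).1 = j := by
    have := pvFoldA_eq l 1 0 le_rfl (by norm_num)
    rw [hv0] at this
    simpa using this
  -- j is in range
  have hjb : 0 ≤ j ∧ j < (l.length : Int) := by
    rw [hj]
    exact pvFold_bounds l _ _ 0
      (fun x hx => by
        have := PySem.List.mem_pyRange_one.mp hx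
        exact ⟨by omega, this.2⟩)
      le_rfl hlen
  -- B's side: the sorted list's head is j
  have hrange : PySem.List.pyRange 0 (l.length : Int) 1
      = 0 :: PySem.List.pyRange 1 (l.length : Int) 1 := by
    have := PySem.List.pyRange_one_cons (a := 0) (b := (l.length : Int)) hlen
    simpa using this
  have hBhead :
      (PySem.List.sorted (PySem.List.pyRange 0 (l.length : Int) 1)
        (fun i => -(PySem.List.pyGetD l i 0)) false).head? = some j := by
    rw [PySem.List.sorted_eq_foldl_insertBy, hrange]
    simp only [List.foldl_cons]
    have hins : PySem.List.insertBy
        (fun a b => decide (-(PySem.List.pyGetD l a 0) < -(PySem.List.pyGetD l b 0))) 0 ([] : List Int)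
        = [0] := by simp [PySem.List.insertBy]
    rw [hins, pvHead_foldl_insertBy]
    rw [hj]
    have hfun : (fun (c y : Int) =>
        if decide (-(PySem.List.pyGetD l y 0) < -(PySem.List.pyGetD l c 0)) then y else c)
          = pvStep l := by
      funext c y; exact pvStep_eq_lt l c y
    rw [hfun]
  -- assemble
  unfold Spec_competitive_layer competitive_layer competitive_layer_alt
  rw [h0]
  simp only
  obtain ⟨w, rest, hsort⟩ : ∃ w rest,
      PySem.List.sorted (PySem.List.pyRange 0 (l.length : Int) 1)
        (fun i => -(PySem.List.pyGetD l i 0)) false = w :: rest := by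
    cases hs : PySem.List.sorted (PySem.List.pyRange 0 (l.length : Int) 1)
        (fun i => -(PySem.List.pyGetD l i 0)) false with
    | nil =>
      rw [hs] at hBhead
      simp at hBhead
    | cons w rest => exact ⟨w, rest, rfl⟩
  have hw : w = j := by
    rw [hsort] at hBhead
    simpa using hBhead
  rw [hsort, hA1, hw]
  exact pvOut_eq l.length j hjb.1 hjb.2
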